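-- pv_equiv track=rewrite | github.com/SidharthAnand04/infinitiV | agents/script_generator.py | _structure_as_json
-- ===== SOURCE A (Python) =====
-- from typing import List, Dict, Optional
--
-- def _structure_as_json(dialogue: List[Dict], actions: List[Dict], scene_plan: Dict) -> List[Dict]:
--     """Structure everything into the final JSON format for the pipeline"""
--
--     structured_script = []
--     dialogue_index = 0
--     action_index = 0
--
--     # Start with scene setting
--     structured_script.append({
--         "id": "scene_start",
--         "type": "scene",
--         "setting": scene_plan.get("setting", "Unknown location"),
--         "description": f"Scene begins in {scene_plan.get('setting', 'a location')} with a {scene_plan.get('tone', 'neutral')} atmosphere."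
--     })
--
--     # Interleave dialogue and actions
--     max_items = max(len(dialogue), len(actions))
--
--     for i in range(max_items * 2):
--         # Add action first (if available)
--         if action_index < len(actions) and i % 2 == 0:
--             structured_script.append(actions[action_index])
--             action_index += 1
--
--         # Add dialogue (if available)
--         if dialogue_index < len(dialogue):
--             structured_script.append(dialogue[dialogue_index])
--             dialogue_index += 1
--
--     # Add any remaining items
--     while action_index < len(actions):
--         structured_script.append(actions[action_index])
--         action_index += 1
--
--     while dialogue_index < len(dialogue):
--         structured_script.append(dialogue[dialogue_index])
--         dialogue_index += 1
--
--     # Ensure all items have unique IDs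
--     for i, block in enumerate(structured_script):
--         if not block.get('id'):
--             block['id'] = f"block_{i}"
--
--     return structured_script
-- ===== SOURCE B (Python) =====
-- def _structure_as_json(dialogue, actions, scene_plan):
--     """Structure everything into the final JSON format for the pipeline"""
--     script = [{
--         "id": "scene_start",
--         "type": "scene",
--         "setting": scene_plan.get("setting", "Unknown location"),
--         "description": f"Scene begins in {scene_plan.get('setting', 'a location')} with a {scene_plan.get('tone', 'neutral')} atmosphere.",
--     }]
--     rest = list(actions)
--     even = True
--     for dlg in dialogue:
--         if even and rest:
--             script.append(rest.pop(0))
--         even = not even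
--         script.append(dlg)
--     script.extend(rest)
--     for i, block in enumerate(script):
--         if not block.get('id'):
--             block['id'] = f"block_{i}"
--     return script
-- ===== Notes on version B (the rewrite author's own statement) =====
-- stated objective: simpler
-- what changed: Replaces the max(len)*2 counter loop with its modular-index guards and the two trailing drain while-loops by a single pass over dialogue that alternately pulls the next action from a working copy of actions, then one extend with the leftover actions; the id-filling pass stays.
import Mathlib
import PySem

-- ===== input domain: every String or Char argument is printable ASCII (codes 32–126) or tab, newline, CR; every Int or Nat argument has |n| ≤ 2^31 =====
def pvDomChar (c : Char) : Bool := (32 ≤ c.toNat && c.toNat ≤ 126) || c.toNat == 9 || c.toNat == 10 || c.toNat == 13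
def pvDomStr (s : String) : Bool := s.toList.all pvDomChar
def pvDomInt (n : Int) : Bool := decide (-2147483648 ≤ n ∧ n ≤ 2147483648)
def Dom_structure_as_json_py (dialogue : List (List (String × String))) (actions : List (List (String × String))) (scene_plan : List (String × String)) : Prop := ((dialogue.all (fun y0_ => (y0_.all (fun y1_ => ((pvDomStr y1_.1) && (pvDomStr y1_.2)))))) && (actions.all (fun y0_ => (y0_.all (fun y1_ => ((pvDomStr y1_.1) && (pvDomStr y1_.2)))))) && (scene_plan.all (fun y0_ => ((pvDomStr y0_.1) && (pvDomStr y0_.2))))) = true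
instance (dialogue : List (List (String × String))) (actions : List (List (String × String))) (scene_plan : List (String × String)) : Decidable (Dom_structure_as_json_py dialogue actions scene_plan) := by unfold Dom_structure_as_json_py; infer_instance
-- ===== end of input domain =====

-- B replaces A's max(len)*2 counter loop and its two trailing drain while-loops by one pass over
-- dialogue that pulls actions from a working list, then a single extend (objective: simpler).
-- Both programs fill missing/empty ids by mutating the block dicts in place; the equivalence proved
-- here is about the return value.

-- a block / dict is an association list of string pairs in insertion order
abbrev PvBlock : Type := List (String × String)

-- ===== PORT A =====
-- scene-header dict (identical literal in both Pythons, so shared by both ports)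
def pvScene (scene_plan : PvBlock) : PvBlock :=
  [("id", "scene_start"), ("type", "scene"),
   ("setting", (PySem.Dict.mk scene_plan).getD "setting" "Unknown location"),
   ("description", "Scene begins in " ++ (PySem.Dict.mk scene_plan).getD "setting" "a location"
      ++ " with a " ++ (PySem.Dict.mk scene_plan).getD "tone" "neutral" ++ " atmosphere.")]

-- final id-filling pass (identical code in both Pythons, so shared by both ports):
-- block['id'] = f"block_{i}" when block.get('id') is missing or "" (the only falsy string)
def pvAssignIds (script : List PvBlock) : List PvBlock :=
  (PySem.List.enumerate script 0).map (fun ib =>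
    match (PySem.Dict.mk ib.2).get? "id" with
    | none => ((PySem.Dict.mk ib.2).insert "id" ("block_" ++ PySem.Int.toStr ib.1)).items
    | some "" => ((PySem.Dict.mk ib.2).insert "id" ("block_" ++ PySem.Int.toStr ib.1)).items
    | some _ => ib.2)

-- A's "for i in range(max_items * 2)" loop over state (structured_script, dialogue_index, action_index)
def pvLoopA (dialogue actions : List PvBlock) (stop i : Nat) (s : List PvBlock) (di ai : Nat) :
    List PvBlock × Nat × Nat :=
  if i < stop then
    let (s, ai) := if ai < actions.length ∧ i % 2 = 0
      then (s ++ [actions.getD ai []], ai + 1) else (s, ai)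
    let (s, di) := if di < dialogue.length
      then (s ++ [dialogue.getD di []], di + 1) else (s, di)
    pvLoopA dialogue actions stop (i + 1) s di ai
  else (s, di, ai)
termination_by stop - i

-- A's trailing "while index < len(xs): append xs[index]; index += 1"
def pvWhileDrain (s : List PvBlock) (xs : List PvBlock) (idx : Nat) : List PvBlock × Nat :=
  if h : idx < xs.length then pvWhileDrain (s ++ [xs[idx]]) xs (idx + 1) else (s, idx)
termination_by xs.length - idx

def structure_as_json_py (dialogue : List (List (String × String))) (actions : List (List (String × String))) (scene_plan : List (String × String)) : List (List (String × String)) :=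
  let max_items := max dialogue.length actions.length
  let r := pvLoopA dialogue actions (max_items * 2) 0 [pvScene scene_plan] 0 0
  let r2 := pvWhileDrain r.1 actions r.2.2
  let r3 := pvWhileDrain r2.1 dialogue r.2.1
  pvAssignIds r3.1

-- ===== PORT B =====
-- B's loop body: when `even` pull the next action from `rest` (if any), then append the dialogue line
def pvStepB (st : List PvBlock × List PvBlock × Bool) (dlg : PvBlock) :
    List PvBlock × List PvBlock × Bool :=
  let (s, rest, even) := st
  match even, rest with
  | true, r :: rs => (s ++ [r, dlg], rs, false)
  | _, _ => (s ++ [dlg], rest, !st.2.2)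

def structure_as_json_py_alt (dialogue : List (List (String × String))) (actions : List (List (String × String))) (scene_plan : List (String × String)) : List (List (String × String)) :=
  let r := dialogue.foldl pvStepB ([pvScene scene_plan], actions, true)
  pvAssignIds (r.1 ++ r.2.1)

-- ===== PRECONDITION & SPEC =====
def Spec_structure_as_json_py (dialogue : List (List (String × String))) (actions : List (List (String × String))) (scene_plan : List (String × String)) (out : List (List (String × String))) : Prop := out = structure_as_json_py_alt dialogue actions scene_plan
instance (dialogue : List (List (String × String))) (actions : List (List (String × String))) (scene_plan : List (String × String)) (out : List (List (String × String))) : Decidable (Spec_structure_as_json_py dialogue actions scene_plan out) := by unfold Spec_structure_as_json_py; infer_instance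

-- ===== CLAIM (what is proved, stated in full; the proofs are below) =====
def Claim_equal_structure_as_json_py : Prop := ∀ (dialogue : List (List (String × String))) (actions : List (List (String × String))) (scene_plan : List (String × String)), Dom_structure_as_json_py dialogue actions scene_plan → Spec_structure_as_json_py dialogue actions scene_plan (structure_as_json_py dialogue actions scene_plan)

-- ===== LEMMAS AND PROOFS =====

-- the interleaving both loops produce before the id pass: an action precedes every even-positioned
-- dialogue line while actions remain, leftover actions (or dialogue) follow in order
def pvWeave (e : Bool) : List PvBlock → List PvBlock → List PvBlock
  | [], rest => rest
  | dlg :: ds, rest =>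
    match e, rest with
    | true, r :: rs => r :: dlg :: pvWeave false ds rs
    | _, _ => dlg :: pvWeave (!e) ds rest

-- A's drain-loop appends the remaining suffix
theorem pvWhileDrain_fst (s xs : List PvBlock) (idx : Nat) :
    (pvWhileDrain s xs idx).1 = s ++ xs.drop idx := by
  induction s, idx using pvWhileDrain.induct xs with
  | case1 s idx h ih =>
      rw [pvWhileDrain]; simp only [h, dif_pos, ih]
      rw [List.drop_eq_getElem_cons h]; simp
  | case2 s idx h =>
      rw [pvWhileDrain]; simp only [h, dif_neg, not_false_iff]
      rw [List.drop_eq_nil_of_le (by omega)]; simp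

-- A's loop followed by the two drain loops
def pvFinish (dialogue actions : List PvBlock) (t : List PvBlock × Nat × Nat) : List PvBlock :=
  (pvWhileDrain (pvWhileDrain t.1 actions t.2.2).1 dialogue t.2.1).1

-- once the dialogue pointer is exhausted, the loop plus the drains just append the remaining actions
theorem pvLoopA_drain (dialogue actions : List PvBlock) (stop : Nat) :
    ∀ (k i ai : Nat) (s : List PvBlock), stop - i ≤ k →
      pvFinish dialogue actions (pvLoopA dialogue actions stop i s dialogue.length ai)
      = s ++ actions.drop ai := by
  intro k
  induction k with
  | zero =>
      intro i ai s hk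
      rw [pvLoopA]
      have : ¬ i < stop := by omega
      simp only [this, if_false]
      simp [pvFinish, pvWhileDrain_fst]
  | succ k ih =>
      intro i ai s hk
      rw [pvLoopA]
      by_cases hi : i < stop
      · simp only [hi, if_true]
        have hd : ¬ dialogue.length < dialogue.length := by omega
        by_cases hc : ai < actions.length ∧ i % 2 = 0
        · rw [if_pos hc, if_neg hd]
          rw [ih (i+1) (ai+1) _ (by omega)]
          rw [List.drop_eq_getElem_cons hc.1, List.getD_eq_getElem actions [] hc.1]
          simp
        · rw [if_neg hc, if_neg hd]
          exact ih (i+1) ai s (by omega)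
      · simp only [hi, if_false]
        simp [pvFinish, pvWhileDrain_fst]

theorem pvParitySucc (n : Nat) : decide ((n + 1) % 2 = 0) = !decide (n % 2 = 0) := by
  rcases Nat.mod_two_eq_zero_or_one n with h | h <;> simp [Nat.add_mod, h]

-- A's whole pipeline (loop from index di = loop counter, then both drains) produces the weave
theorem pvLoopA_weave (dialogue actions : List PvBlock) (stop : Nat) (hstop : dialogue.length ≤ stop) :
    ∀ (k di ai : Nat) (s : List PvBlock), dialogue.length - di ≤ k → di ≤ dialogue.length →
      pvFinish dialogue actions (pvLoopA dialogue actions stop di s di ai)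
      = s ++ pvWeave (decide (di % 2 = 0)) (dialogue.drop di) (actions.drop ai) := by
  intro k
  induction k with
  | zero =>
      intro di ai s hk hdi
      have h : di = dialogue.length := by omega
      subst h
      rw [pvLoopA_drain dialogue actions stop stop dialogue.length ai s (by omega)]
      rw [List.drop_eq_nil_of_le (le_refl _)]
      simp [pvWeave]
  | succ k ih =>
      intro di ai s hk hdi
      by_cases h : di = dialogue.length
      · subst h
        rw [pvLoopA_drain dialogue actions stop stop dialogue.length ai s (by omega)]
        rw [List.drop_eq_nil_of_le (le_refl _)]
        simp [pvWeave]
      · have hdlt : di < dialogue.length := by omega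
        rw [pvLoopA]
        rw [if_pos (by omega : di < stop)]
        have hdrop := List.drop_eq_getElem_cons hdlt
        by_cases hc : ai < actions.length ∧ di % 2 = 0
        · simp only [if_pos hc, if_pos hdlt]
          rw [ih (di+1) (ai+1) _ (by omega) (by omega)]
          rw [hdrop, List.drop_eq_getElem_cons hc.1, pvParitySucc]
          rw [List.getD_eq_getElem actions [] hc.1, List.getD_eq_getElem dialogue [] hdlt]
          simp only [hc.2, decide_true, Bool.not_true, pvWeave]
          simp
        · simp only [if_neg hc, if_pos hdlt]
          rw [ih (di+1) ai _ (by omega) (by omega)]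
          rw [hdrop, pvParitySucc, List.getD_eq_getElem dialogue [] hdlt]
          by_cases he : di % 2 = 0
          · have hai : actions.length ≤ ai := by
              by_contra hlt; exact hc ⟨by omega, he⟩
            rw [List.drop_eq_nil_of_le hai]
            simp only [he, decide_true, Bool.not_true, pvWeave]
            simp
          · simp only [he, decide_false, Bool.not_false, pvWeave]
            simp

-- B's fold produces the same weave (script so far ++ remaining actions)
theorem pvFoldB_weave (ds : List PvBlock) :
    ∀ (s rest : List PvBlock) (e : Bool),
      (ds.foldl pvStepB (s, rest, e)).1 ++ (ds.foldl pvStepB (s, rest, e)).2.1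
      = s ++ pvWeave e ds rest := by
  induction ds with
  | nil => intro s rest e; simp [pvWeave]
  | cons d ds ih =>
      intro s rest e
      cases e <;> cases rest <;>
        simp only [List.foldl_cons, pvStepB, pvWeave, ih, List.append_assoc, List.cons_append,
          List.nil_append, Bool.not_false, Bool.not_true]

-- ===== VERDICT (by name: the statement is the Claim_ definition above) =====
theorem structure_as_json_py_spec : Claim_equal_structure_as_json_py := by
  intro dialogue actions scene_plan _
  unfold Spec_structure_as_json_py structure_as_json_py structure_as_json_py_alt
  have hA := pvLoopA_weave dialogue actions (max dialogue.length actions.length * 2)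
    (by have := Nat.le_max_left dialogue.length actions.length; omega)
    dialogue.length 0 0 [pvScene scene_plan] (by omega) (by omega)
  have hB := pvFoldB_weave dialogue [pvScene scene_plan] actions true
  simp only [List.drop_zero, Nat.zero_mod, decide_true] at hA
  show pvAssignIds (pvFinish dialogue actions
      (pvLoopA dialogue actions (max dialogue.length actions.length * 2) 0 [pvScene scene_plan] 0 0))
    = pvAssignIds ((dialogue.foldl pvStepB ([pvScene scene_plan], actions, true)).1
        ++ (dialogue.foldl pvStepB ([pvScene scene_plan], actions, true)).2.1)
  rw [hA, hB]
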